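-- pv_equiv track=rewrite | github.com/NorwegianIcecube/led_tsetlin | tm_20newsgroups.py | _drop_post_index
-- ===== SOURCE A (Python) =====
-- def _drop_post_index(sentence, indexed=True, keyword=":0"):
--     """Helper function to drop the post-index part of the sentence."""
--     words = sentence.split()
--     sentence = ""
--     for word in words:
--         sentence += f"{word} "
--         if indexed and keyword in word:
--             break
--         elif keyword in word:
--             break
--     return sentence[:-1]
-- ===== SOURCE B (Python) =====
-- def _drop_post_index(sentence, indexed=True, keyword=":0"):
--     """Locate the first word containing the keyword, then build the result in one slice-and-join."""
--     words = sentence.split()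
--     idx = next((i for i, w in enumerate(words) if keyword in w), None)
--     return ' '.join(words) if idx is None else ' '.join(words[:idx + 1])
-- ===== Notes on version B (the rewrite author's own statement) =====
-- stated objective: simpler
-- what changed: Replaces the grow-a-string-and-break loop (with its duplicated break branch and trailing-space trim) by locating the cut index with next/enumerate and building the result once with a space-join of a word slice.
import Mathlib
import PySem

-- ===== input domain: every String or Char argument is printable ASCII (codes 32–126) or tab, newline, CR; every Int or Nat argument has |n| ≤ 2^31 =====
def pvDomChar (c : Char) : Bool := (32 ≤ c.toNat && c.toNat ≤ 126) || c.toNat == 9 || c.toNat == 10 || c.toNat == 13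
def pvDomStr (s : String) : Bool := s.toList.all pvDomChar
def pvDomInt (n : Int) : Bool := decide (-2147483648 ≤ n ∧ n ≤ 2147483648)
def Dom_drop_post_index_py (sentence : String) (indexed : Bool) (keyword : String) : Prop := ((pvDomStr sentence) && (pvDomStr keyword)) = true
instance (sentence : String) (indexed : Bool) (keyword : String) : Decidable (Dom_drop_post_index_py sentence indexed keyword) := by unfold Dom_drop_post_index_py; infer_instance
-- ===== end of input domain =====

-- B replaces A's grow-and-break string accumulation by locate-the-cut-index then one slice-and-join (simpler decomposition, same cost).
-- ===== PORT A =====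
-- the for-loop of A: grow the accumulator, break (in either branch) when keyword in word
def dropPostLoopA (indexed : Bool) (keyword : String) : List String → String → String
  | [], acc => acc
  | w :: ws, acc =>
    let acc' := acc ++ w ++ " "
    if indexed && PySem.Str.isIn keyword w then acc'
    else if PySem.Str.isIn keyword w then acc'
    else dropPostLoopA indexed keyword ws acc'

def drop_post_index_py (sentence : String) (indexed : Bool) (keyword : String) : String :=
  let words := PySem.Str.split₀ sentence
  let s := dropPostLoopA indexed keyword words ""
  PySem.Str.slice s none (some (-1))

-- ===== PORT B =====
def drop_post_index_py_alt (sentence : String) (indexed : Bool) (keyword : String) : String :=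
  let words := PySem.Str.split₀ sentence
  match words.findIdx? (fun w => PySem.Str.isIn keyword w) with
  | none => PySem.Str.join " " words
  | some i => PySem.Str.join " " (words.take (i + 1))

-- ===== PRECONDITION & SPEC =====
def Spec_drop_post_index_py (sentence : String) (indexed : Bool) (keyword : String) (out : String) : Prop := out = drop_post_index_py_alt sentence indexed keyword
instance (sentence : String) (indexed : Bool) (keyword : String) (out : String) : Decidable (Spec_drop_post_index_py sentence indexed keyword out) := by unfold Spec_drop_post_index_py; infer_instance

-- ===== CLAIM (what is proved, stated in full; the proofs are below) =====
def Claim_equal_drop_post_index_py : Prop := ∀ (sentence : String) (indexed : Bool) (keyword : String), Dom_drop_post_index_py sentence indexed keyword → Spec_drop_post_index_py sentence indexed keyword (drop_post_index_py sentence indexed keyword)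

-- ===== LEMMAS AND PROOFS =====

-- characterisation of A's loop body as chars: words up to and including the first match, each with a trailing space
def dropPostChars (keyword : String) : List String → List Char
  | [] => []
  | w :: ws => w.toList ++ ' ' :: (if PySem.Str.isIn keyword w then [] else dropPostChars keyword ws)

theorem dropPostLoopA_toList (indexed : Bool) (keyword : String) :
    ∀ (ws : List String) (acc : String),
      (dropPostLoopA indexed keyword ws acc).toList = acc.toList ++ dropPostChars keyword ws := by
  intro ws
  induction ws with
  | nil => intro acc; simp [dropPostLoopA, dropPostChars]
  | cons w ws ih =>
    intro acc
    by_cases h : PySem.Str.isIn keyword w = true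
    all_goals simp only [PySem.Str.isIn_eq] at h
    · cases indexed <;>
        simp [dropPostLoopA, dropPostChars, h, String.toList_append]
    · cases indexed <;>
        simp [dropPostLoopA, dropPostChars, h, ih, String.toList_append, List.append_assoc]

theorem join_space_chars (l : List (List Char)) :
    PySem.Chars.join [' '] l = ((l.map (fun c => c ++ [' '])).flatten).dropLast := by
  induction l with
  | nil => simp [PySem.Chars.join_nil]
  | cons a l ih =>
    cases l with
    | nil => simp [PySem.Chars.join_singleton]
    | cons b t =>
      have hne : (((b :: t).map (fun c => c ++ [' '])).flatten) ≠ [] := by simp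
      have hfl : ((a :: b :: t).map (fun c => c ++ [' '])).flatten
          = (a ++ [' ']) ++ ((b :: t).map (fun c => c ++ [' '])).flatten := by simp
      rw [PySem.Chars.join_cons_cons, ih, hfl, List.dropLast_append_of_ne_nil hne]

theorem dropPostChars_eq_findIdx (keyword : String) (ws : List String) :
    dropPostChars keyword ws
      = (match ws.findIdx? (fun w => PySem.Str.isIn keyword w) with
        | none => (ws.map (fun w => w.toList ++ [' '])).flatten
        | some i => ((ws.take (i + 1)).map (fun w => w.toList ++ [' '])).flatten) := by
  induction ws with
  | nil => simp [dropPostChars]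
  | cons w ws ih =>
    simp only [PySem.Str.isIn_eq] at ih ⊢
    by_cases h : PySem.Chars.isIn keyword.toList w.toList = true
    · simp [dropPostChars, h, List.findIdx?_cons]
    · cases hfi : ws.findIdx? (fun w => PySem.Chars.isIn keyword.toList w.toList) <;>
        simp [dropPostChars, h, List.findIdx?_cons, ih, hfi]

-- ===== VERDICT (by name: the statement is the Claim_ definition above) =====
theorem drop_post_index_py_spec : Claim_equal_drop_post_index_py := by
  unfold Claim_equal_drop_post_index_py
  intro sentence indexed keyword _
  unfold Spec_drop_post_index_py drop_post_index_py drop_post_index_py_alt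
  apply String.toList_inj.mp
  rw [PySem.Str.toList_slice, PySem.Chars.slice_eq_listSlice, PySem.List.slice_to_neg_one,
    dropPostLoopA_toList, dropPostChars_eq_findIdx]
  simp only [PySem.Str.isIn_eq]
  have hmap : ∀ ws : List String,
      (ws.map String.toList).map (fun c => c ++ [' ']) = ws.map (fun w => w.toList ++ [' ']) := by
    intro ws; rw [List.map_map]; rfl
  have hsp : (" " : String).toList = [' '] := by decide
  have h0 : ("" : String).toList = [] := by decide
  cases hfi : (PySem.Str.split₀ sentence).findIdx?
      (fun w => PySem.Chars.isIn keyword.toList w.toList) with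
  | none =>
    dsimp only
    rw [PySem.Str.toList_join, hsp, join_space_chars, hmap, h0, List.nil_append]
  | some i =>
    dsimp only
    rw [PySem.Str.toList_join, hsp, join_space_chars, hmap, List.map_take, h0, List.nil_append]
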